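-- pv_equiv track=rewrite | github.com/blas1306/MathTeX_Studio | src/autocomplete_engine.py | _looks_like_code_line
-- ===== SOURCE A (Python) =====
-- def _looks_like_code_line(line_text: str) -> bool:
--     stripped = line_text.strip()
--     if not stripped:
--         return False
--     if stripped.startswith("\\"):
--         return False
--     if "=" in stripped:
--         return True
--     starters = ("for", "while", "if", "elif", "else", "function", "repeat", "until", "return", "from", "import")
--     return any(stripped.lower().startswith(f"{name} ") or stripped.lower() == name for name in starters)
-- ===== SOURCE B (Python) =====
-- _KEYWORDS = frozenset({"for", "while", "if", "elif", "else", "function",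
--                        "repeat", "until", "return", "from", "import"})
--
--
-- def _looks_like_code_line(line_text: str) -> bool:
--     stripped = line_text.strip()
--     if not stripped:
--         return False
--     if stripped[0] == "\\":
--         return False
--     # single left-to-right scan: detect '=' anywhere, and accumulate the
--     # lowercased first space-delimited token as we go
--     token_chars = []
--     in_token = True
--     for ch in stripped:
--         if ch == "=":
--             return True
--         if in_token:
--             if ch == " ":
--                 in_token = False
--             else:
--                 token_chars.append(ch.lower())
--     return "".join(token_chars) in _KEYWORDS
-- ===== Notes on version B (the rewrite author's own statement) =====
-- stated objective: alternative
-- what changed: Replaces A's staged built-in scans (substring test for the equals sign, then a per-keyword startswith/equality pass over a tuple) by one left-to-right character state machine that returns on the first equals sign and accumulates the lowercased first space-delimited token, finishing with a frozenset lookup.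
import Mathlib
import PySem

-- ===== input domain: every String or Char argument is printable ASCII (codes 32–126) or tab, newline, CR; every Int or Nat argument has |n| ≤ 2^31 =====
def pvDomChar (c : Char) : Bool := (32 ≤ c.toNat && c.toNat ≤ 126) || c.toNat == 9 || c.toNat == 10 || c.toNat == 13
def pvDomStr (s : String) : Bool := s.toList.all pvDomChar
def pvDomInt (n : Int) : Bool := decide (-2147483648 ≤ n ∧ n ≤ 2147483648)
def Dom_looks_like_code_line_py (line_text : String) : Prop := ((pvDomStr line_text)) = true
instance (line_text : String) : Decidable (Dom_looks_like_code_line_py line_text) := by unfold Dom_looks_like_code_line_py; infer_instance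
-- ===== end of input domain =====

-- B replaces A's staged built-in scans ('=' in, per-keyword startswith) by one
-- left-to-right character state machine accumulating the lowercased first token
-- (objective: alternative).

-- ===== PORT A =====
def looks_like_code_line_py (line_text : String) : Bool :=
  let stripped := PySem.Str.strip line_text
  if stripped = "" then false
  else if PySem.Str.startswith stripped "\\" then false
  else if PySem.Str.isIn "=" stripped then true
  else
    (["for", "while", "if", "elif", "else", "function", "repeat", "until", "return", "from", "import"] : List String).any
      (fun name => PySem.Str.startswith (PySem.Str.lower stripped) (name ++ " ") ||
                   PySem.Str.lower stripped == name)

-- ===== PORT B =====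
-- keyword strings as their code-point lists (Source B's "".join(token) in _KEYWORDS)
def pvKeywordsB : PySem.Set (List Char) :=
  PySem.Set.ofList ["for".toList, "while".toList, "if".toList, "elif".toList, "else".toList,
    "function".toList, "repeat".toList, "until".toList, "return".toList, "from".toList, "import".toList]

-- one step of Source B's character loop; state = (returned-True-on-'=', in_token, token_chars)
def pvStep (s : Bool × Bool × List Char) (c : Char) : Bool × Bool × List Char :=
  if s.1 then s
  else if c = '=' then (true, s.2)
  else if s.2.1 then
    if c = ' ' then (false, false, s.2.2)
    else (false, true, s.2.2 ++ [PySem.Chars.lowerChar c])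
  else s

def looks_like_code_line_py_alt (line_text : String) : Bool :=
  let stripped := PySem.Str.strip line_text
  if stripped = "" then false
  else if PySem.Str.pyGet? stripped 0 == some '\\' then false
  else
    let st := stripped.toList.foldl pvStep (false, true, [])
    if st.1 then true
    else pvKeywordsB.contains st.2.2

-- ===== PRECONDITION & SPEC =====
def Spec_looks_like_code_line_py (line_text : String) (out : Bool) : Prop := out = looks_like_code_line_py_alt line_text
instance (line_text : String) (out : Bool) : Decidable (Spec_looks_like_code_line_py line_text out) := by unfold Spec_looks_like_code_line_py; infer_instance

-- ===== CLAIM (what is proved, stated in full; the proofs are below) =====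
def Claim_equal_looks_like_code_line_py : Prop := ∀ (line_text : String), Dom_looks_like_code_line_py line_text → Spec_looks_like_code_line_py line_text (looks_like_code_line_py line_text)

-- ===== LEMMAS AND PROOFS =====

-- [c] is a prefix of l iff l starts with c
lemma pv_single_prefix (c : Char) (l : List Char) : [c] <+: l ↔ l.head? = some c := by
  cases l with
  | nil => simp
  | cons a t => simp [List.cons_prefix_cons]; exact eq_comm

-- [c] is an infix of l iff c ∈ l
lemma pv_single_infix (c : Char) (l : List Char) : [c] <:+: l ↔ c ∈ l := by
  constructor
  · rintro ⟨s, t, rfl⟩; simp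
  · intro h
    obtain ⟨s, t, rfl⟩ := List.append_of_mem h
    exact ⟨s, t, by simp⟩

lemma pv_takeWhile_eq_self (p : Char → Bool) (l : List Char) (h : ∀ c ∈ l, p c = true) :
    l.takeWhile p = l := by
  induction l with
  | nil => rfl
  | cons a t ih =>
    simp only [List.takeWhile_cons, h a (by simp)]
    simp [ih (fun c hc => h c (by simp [hc]))]

lemma pv_dropWhile_head (p : Char → Bool) (l : List Char) (a : Char) (t : List Char)
    (hd : l.dropWhile p = a :: t) : p a = false := by
  induction l with
  | nil => simp at hd
  | cons x xs ih =>
    rw [List.dropWhile_cons] at hd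
    split at hd
    · exact ih hd
    · rename_i hx
      cases hd
      simpa using hx

-- lowering a character yields a space exactly for a space
lemma pv_lowerChar_space (c : Char) : (PySem.Chars.lowerChar c = ' ') ↔ c = ' ' := by
  unfold PySem.Chars.lowerChar
  split
  · rename_i h
    simp only [PySem.Chars.isupper, Bool.and_eq_true, decide_eq_true_eq] at h
    have h1 : 65 ≤ c.toNat := by
      have := Char.le_def.mp h.1; exact_mod_cast this
    have h2 : c.toNat ≤ 90 := by
      have := Char.le_def.mp h.2; exact_mod_cast this
    constructor
    · intro he
      exfalso
      have hv : (Char.ofNat (c.toNat + 32)).toNat = c.toNat + 32 := by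
        unfold Char.ofNat
        rw [dif_pos (by constructor; omega)]
        rfl
      have := congrArg Char.toNat he
      rw [hv] at this
      simp only [show (' ' : Char).toNat = 32 from rfl] at this
      omega
    · intro he
      subst he
      simp at h1
  · simp

-- the longest space-free prefix equals a space-free word n iff the line is "n <sp>…" or exactly "n"
lemma pv_tok_eq (lt ns : List Char) (hn : (' ' : Char) ∉ ns) :
    lt.takeWhile (· ≠ ' ') = ns ↔ (ns ++ [' '] <+: lt ∨ lt = ns) := by
  constructor
  · intro h
    have hsplit : ns ++ lt.dropWhile (· ≠ ' ') = lt := by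
      conv_rhs => rw [← List.takeWhile_append_dropWhile (p := (· ≠ ' ')) (l := lt)]
      rw [h]
    cases hd : lt.dropWhile (· ≠ ' ') with
    | nil => right; rw [← hsplit, hd, List.append_nil]
    | cons a t =>
      left
      have ha : a = ' ' := by
        have := pv_dropWhile_head _ _ _ _ hd
        simpa using this
      exact ⟨t, by rw [← hsplit, hd, ha]; simp⟩
  · rintro (⟨r, rfl⟩ | rfl)
    · rw [List.append_assoc, List.takeWhile_append]
      have hself : (ns.takeWhile (· ≠ ' ')) = ns :=
        pv_takeWhile_eq_self _ _ (fun c hc => by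
          simp only [decide_eq_true_eq]; rintro rfl; exact hn hc)
      rw [hself]
      simp
    · exact pv_takeWhile_eq_self _ _ (fun c hc => by
        simp only [decide_eq_true_eq]; rintro rfl; exact hn hc)

-- per-name: A's test equals comparing the first space-delimited token of `low` with n
lemma pv_name_eq (low n : String) (hn : (' ' : Char) ∉ n.toList) :
    (PySem.Str.startswith low (n ++ " ") || low == n) =
    (low.toList.takeWhile (· ≠ ' ') == n.toList) := by
  rw [Bool.eq_iff_iff]
  simp only [Bool.or_eq_true, beq_iff_eq, PySem.Str.startswith_eq, PySem.Chars.startswith_iff,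
    String.toList_append, ← String.toList_inj]
  rw [pv_tok_eq _ _ hn]
  constructor
  · rintro (h | h)
    · left; simpa using h
    · right; exact h
  · rintro (h | h)
    · left; simpa using h
    · right; exact h

-- the whole keyword branch of A, as membership of the first token
lemma pv_branch (low : String) (names : List String)
    (h : ∀ n ∈ names, (' ' : Char) ∉ n.toList) :
    names.any (fun n => PySem.Str.startswith low (n ++ " ") || low == n) =
    (names.map String.toList).contains (low.toList.takeWhile (· ≠ ' ')) := by
  induction names with
  | nil => rfl
  | cons n t ih =>
    rw [List.any_cons, List.map_cons, List.contains_cons,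
      pv_name_eq low n (h n (by simp)), ih (fun m hm => h m (by simp [hm])), Bool.or_comm]

-- single-step values of B's loop
lemma pvStep_frozen (t : Bool × List Char) (c : Char) : pvStep (true, t) c = (true, t) := by
  simp [pvStep]

lemma pvStep_eq (t : Bool × List Char) : pvStep (false, t) '=' = (true, t) := by
  simp [pvStep]

lemma pvStep_fst (t : Bool × List Char) (c : Char) (hc : c ≠ '=') :
    (pvStep (false, t) c).1 = false := by
  simp only [pvStep, Bool.false_eq_true, if_false, if_neg hc]
  split_ifs <;> rfl

lemma pvStep_off (acc : List Char) (c : Char) (hc : c ≠ '=') :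
    pvStep (false, false, acc) c = (false, false, acc) := by
  simp [pvStep, hc]

lemma pvStep_space (acc : List Char) : pvStep (false, true, acc) ' ' = (false, false, acc) := by
  simp [pvStep]

lemma pvStep_tok (acc : List Char) (c : Char) (hc : c ≠ '=') (hs : c ≠ ' ') :
    pvStep (false, true, acc) c = (false, true, acc ++ [PySem.Chars.lowerChar c]) := by
  simp [pvStep, hc, hs]

-- B's loop, once '=' has been seen, never changes state
lemma pv_fold_frozen (l : List Char) (t : Bool × List Char) :
    l.foldl pvStep (true, t) = (true, t) := by
  induction l with
  | nil => rfl
  | cons c r ih => simpa [pvStep_frozen] using ih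

-- if '=' occurs, B's loop ends with the flag set
lemma pv_fold_eqMem (l : List Char) (t : Bool × List Char) (h : '=' ∈ l) :
    (l.foldl pvStep (false, t)).1 = true := by
  induction l generalizing t with
  | nil => simp at h
  | cons c r ih =>
    by_cases hc : c = '='
    · subst hc
      rw [List.foldl_cons, pvStep_eq, pv_fold_frozen]
    · have hr : '=' ∈ r := by
        rcases List.mem_cons.mp h with h1 | h1
        · exact absurd h1.symm hc
        · exact h1
      rw [List.foldl_cons,
        show pvStep (false, t) c = ((pvStep (false, t) c).1, (pvStep (false, t) c).2) from rfl,
        pvStep_fst t c hc]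
      exact ih _ hr

-- without '=', once past the first token the loop does nothing
lemma pv_fold_noEq_off (l : List Char) (acc : List Char) (h : '=' ∉ l) :
    l.foldl pvStep (false, false, acc) = (false, false, acc) := by
  induction l with
  | nil => rfl
  | cons c r ih =>
    have hc : ¬ c = '=' := fun hh => h (hh ▸ List.mem_cons_self)
    rw [List.foldl_cons, pvStep_off acc c hc]
    exact ih (fun hm => h (List.mem_cons_of_mem _ hm))

-- without '=', B's loop accumulates the lowercased first space-delimited token
lemma pv_fold_noEq_on (l : List Char) (acc : List Char) (h : '=' ∉ l) :
    (l.foldl pvStep (false, true, acc)).1 = false ∧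
    (l.foldl pvStep (false, true, acc)).2.2 =
      acc ++ (l.takeWhile (· ≠ ' ')).map PySem.Chars.lowerChar := by
  induction l generalizing acc with
  | nil => simp
  | cons c r ih =>
    have hc : ¬ c = '=' := fun hh => h (hh ▸ List.mem_cons_self)
    have hr : '=' ∉ r := fun hm => h (List.mem_cons_of_mem _ hm)
    by_cases hsp : c = ' '
    · subst hsp
      rw [List.foldl_cons, pvStep_space, pv_fold_noEq_off r acc hr]
      simp
    · rw [List.foldl_cons, pvStep_tok acc c hc hsp]
      rcases ih (acc ++ [PySem.Chars.lowerChar c]) hr with ⟨h1, h2⟩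
      refine ⟨h1, ?_⟩
      rw [h2, List.takeWhile_cons, if_pos (by simpa using hsp)]
      simp

-- ===== VERDICT (by name: the statement is the Claim_ definition above) =====
theorem looks_like_code_line_py_spec : Claim_equal_looks_like_code_line_py := by
  intro line_text _
  unfold Spec_looks_like_code_line_py looks_like_code_line_py looks_like_code_line_py_alt
  by_cases h1 : PySem.Str.strip line_text = ""
  · simp only [h1, if_pos]
  rw [if_neg h1, if_neg h1]
  set stripped := PySem.Str.strip line_text with hs
  set L := stripped.toList with hL
  -- the two leading-backslash guards agree
  have hguard : PySem.Str.startswith stripped "\\" = (PySem.Str.pyGet? stripped 0 == some '\\') := by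
    rw [Bool.eq_iff_iff]
    simp only [PySem.Str.startswith_eq, PySem.Chars.startswith_iff, beq_iff_eq,
      PySem.Str.pyGet?_eq, PySem.Chars.pyGet?_eq_listPyGet?, PySem.List.pyGet?_zero]
    rw [show ("\\" : String).toList = ['\\'] from rfl, pv_single_prefix, List.head?_eq_getElem?]
  rw [hguard]
  by_cases h2 : (PySem.Str.pyGet? stripped 0 == some '\\') = true
  · rw [if_pos h2, if_pos h2]
  rw [if_neg h2, if_neg h2]
  show _ = (if (List.foldl pvStep (false, true, []) L).1 = true then true
            else pvKeywordsB.contains (List.foldl pvStep (false, true, []) L).2.2)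
  -- '=' membership vs the loop's flag
  have hisin : PySem.Str.isIn "=" stripped = true ↔ '=' ∈ L := by
    rw [PySem.Str.isIn_iff_infix, (show ("=" : String).toList = ['='] from rfl), pv_single_infix]
  by_cases h3 : '=' ∈ L
  · rw [if_pos (hisin.mpr h3)]
    rw [pv_fold_eqMem L _ h3]
    simp
  · rw [if_neg (fun hh => h3 (hisin.mp hh))]
    rcases pv_fold_noEq_on L [] h3 with ⟨hf1, hf2⟩
    rw [hf1]
    simp only [Bool.false_eq_true, ite_false]
    rw [hf2, List.nil_append]
    -- A's branch as first-token membership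
    rw [pv_branch (PySem.Str.lower stripped) _ (by decide)]
    -- tokens agree: takeWhile of lowered = lowered takeWhile
    have hlow : (PySem.Str.lower stripped).toList = L.map PySem.Chars.lowerChar := by
      simp [PySem.Chars.lower]
      rw [hL]
    rw [hlow, List.takeWhile_map]
    have hpred : ((fun c : Char => decide (c ≠ ' ')) ∘ PySem.Chars.lowerChar) =
        (fun c : Char => decide (c ≠ ' ')) := by
      funext c
      simp only [Function.comp_apply, decide_eq_decide]
      exact not_congr (pv_lowerChar_space c)
    rw [hpred]
    rw [show ((["for", "while", "if", "elif", "else", "function", "repeat", "until", "return", "from", "import"] : List String).map String.toList) = (pvKeywordsB : List (List Char)) from by decide]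
    congr 1
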